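-- pv_equiv track=rewrite | github.com/HolczliAndrei/Laborator_Sem2 | Lab_2.py | masini
-- ===== SOURCE A (Python) =====
-- def masini(timp_lucru, timp_masini):
--     timp_masini.sort()
--     lista_masini_reparate = []
--     for i in range(len(timp_masini)):
--         if timp_masini[i] <= timp_lucru:
--             lista_masini_reparate.append(timp_masini[i])
--             timp_lucru -= timp_masini[i]
--     return lista_masini_reparate
-- ===== SOURCE B (Python) =====
-- def masini(timp_lucru, timp_masini):
--     timp_masini.sort()
--     # remaining budget before each position, assuming every earlier car was taken
--     rem = [timp_lucru]
--     for x in timp_masini: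
--         rem.append(rem[-1] - x)
--     # sorted list => accepted cars form a prefix: first index whose time exceeds
--     # the remaining budget bounds the answer
--     count = next((i for i, x in enumerate(timp_masini) if x > rem[i]),
--                  len(timp_masini))
--     return timp_masini[:count]
-- ===== Notes on version B (the rewrite author's own statement) =====
-- stated objective: alternative
-- what changed: Instead of A's append loop that conditionally accumulates, B builds the table of remaining budgets by successive subtraction, finds the first index whose sorted time exceeds its remaining budget, and returns that prefix slice of the sorted list.
import Mathlib
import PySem

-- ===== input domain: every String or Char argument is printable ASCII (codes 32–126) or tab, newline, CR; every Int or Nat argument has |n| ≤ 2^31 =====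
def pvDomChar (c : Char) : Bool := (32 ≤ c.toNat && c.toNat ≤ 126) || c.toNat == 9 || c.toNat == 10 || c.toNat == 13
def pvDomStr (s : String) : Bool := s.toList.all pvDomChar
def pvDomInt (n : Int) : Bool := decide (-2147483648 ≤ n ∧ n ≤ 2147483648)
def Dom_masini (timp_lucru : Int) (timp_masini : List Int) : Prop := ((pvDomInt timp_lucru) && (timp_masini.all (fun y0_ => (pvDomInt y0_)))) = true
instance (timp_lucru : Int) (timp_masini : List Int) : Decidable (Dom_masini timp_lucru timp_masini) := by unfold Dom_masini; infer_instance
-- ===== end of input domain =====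

-- ===== PORT A =====
-- Header: B sorts then slices a prefix found via a remaining-budget table (alternative decomposition).
-- Both A and B sort timp_masini in place (same side effect); the theorems are about the return value.
def masini (timp_lucru : Int) (timp_masini : List Int) : List Int :=
  let s := PySem.List.sorted timp_masini (fun x => x) false
  (s.foldl (fun (st : Int × List Int) x =>
      if x ≤ st.1 then (st.1 - x, st.2 ++ [x]) else st) (timp_lucru, [])).2

-- ===== PORT B =====
-- remaining budgets before each position (B's rem list, built by successive subtraction)
def remList (t : Int) : List Int → List Int
  | [] => [t]
  | x :: xs => t :: remList (t - x) xs

-- first index i with s[i] > rem[i] (default: length of s)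
def firstFail : List Int → List Int → Nat
  | x :: s', r :: rem' => if r < x then 0 else firstFail s' rem' + 1
  | _, _ => 0

def masini_alt (timp_lucru : Int) (timp_masini : List Int) : List Int :=
  let s := PySem.List.sorted timp_masini (fun x => x) false
  s.take (firstFail s (remList timp_lucru s))

-- ===== PRECONDITION & SPEC =====
def Spec_masini (timp_lucru : Int) (timp_masini : List Int) (out : List Int) : Prop := out = masini_alt timp_lucru timp_masini
instance (timp_lucru : Int) (timp_masini : List Int) (out : List Int) : Decidable (Spec_masini timp_lucru timp_masini out) := by unfold Spec_masini; infer_instance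

-- ===== CLAIM (what is proved, stated in full; the proofs are below) =====
def Claim_equal_masini : Prop := ∀ (timp_lucru : Int) (timp_masini : List Int), Dom_masini timp_lucru timp_masini → Spec_masini timp_lucru timp_masini (masini timp_lucru timp_masini)

-- ===== LEMMAS AND PROOFS =====

-- ===== VERDICT (by name: the statement is the Claim_ definition above) =====
-- A's loop body
def aStep (st : Int × List Int) (x : Int) : Int × List Int :=
  if x ≤ st.1 then (st.1 - x, st.2 ++ [x]) else st

theorem skipAll (s : List Int) (t : Int) (acc : List Int)
    (h : ∀ y ∈ s, t < y) : s.foldl aStep (t, acc) = (t, acc) := by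
  induction s with
  | nil => rfl
  | cons x s' ih =>
    have hx := h x (List.mem_cons_self ..)
    simp only [List.foldl_cons, aStep, if_neg (by omega : ¬ x ≤ t)]
    exact ih (fun y hy => h y (List.mem_cons_of_mem _ hy))

theorem loop_eq (s : List Int) (t : Int) (acc : List Int)
    (hs : s.Pairwise (· ≤ ·)) :
    (s.foldl aStep (t, acc)).2 = acc ++ s.take (firstFail s (remList t s)) := by
  induction s generalizing t acc with
  | nil => simp
  | cons x s' ih =>
    rcases List.pairwise_cons.1 hs with ⟨hx, hs'⟩
    by_cases hle : x ≤ t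
    · simp only [List.foldl_cons, aStep, if_pos hle, remList, firstFail,
        if_neg (by omega : ¬ t < x), List.take_succ_cons]
      rw [ih (t - x) (acc ++ [x]) hs']
      simp
    · simp only [List.foldl_cons, aStep, if_neg hle, remList, firstFail,
        if_pos (by omega : t < x), List.take_zero, List.append_nil]
      have := skipAll s' t acc (fun y hy => lt_of_lt_of_le (by omega) (hx y hy))
      rw [this]

theorem masini_spec : Claim_equal_masini := by
  intro t xs _
  unfold Spec_masini masini masini_alt
  have h := loop_eq (PySem.List.sorted xs (fun x => x) false) t []
    (by simpa using PySem.List.sorted_pairwise (xs := xs) (key := fun x => x))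
  simpa [aStep] using h
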